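-- pv_equiv track=rewrite | github.com/mhennecke/adventofcode | 2025/8-playground/part2.py | last_boxes_x
-- ===== SOURCE A (Python) =====
-- import itertools
--
-- def last_boxes_x(points: list[tuple[int, int, int]]) -> tuple[int, int]:
--     pairs = itertools.combinations(range(len(points)), 2)
--     distances = sorted([[sum((a - b)**2 for a, b in zip(points[p1], points[p2])), p1, p2] for p1, p2 in pairs])
--     circuits = [set([i]) for i in range(len(points))]
--
--     for _, p1, p2 in distances:
--         circuits[p1].update(circuits[p2])
--         for p in circuits[p2]:
--             circuits[p] = circuits[p1]
--         if len({id(c): len(c) for c in circuits}.values()) == 1: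
--             return points[p1][0] * points[p2][0]
-- ===== SOURCE B (Python) =====
-- def last_boxes_x(points):
--     n = len(points)
--     edges = []
--     for p1 in range(n):
--         x1, y1, z1 = points[p1]
--         for p2 in range(p1 + 1, n):
--             x2, y2, z2 = points[p2]
--             edges.append(((x1 - x2) ** 2 + (y1 - y2) ** 2 + (z1 - z2) ** 2, p1, p2))
--     if not edges:
--         return None
--     edges.sort()
--
--     def connected(k):
--         # is the graph of the k closest pairs connected?
--         adj = [[] for _ in range(n)]
--         for _, p, q in edges[:k]:
--             adj[p].append(q)
--             adj[q].append(p)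
--         seen = [False] * n
--         stack = [0]
--         while stack:
--             u = stack.pop()
--             if not seen[u]:
--                 seen[u] = True
--                 stack += adj[u]
--         return all(seen)
--
--     # connected(k) is monotone in k; find the smallest connecting prefix
--     lo, hi = 1, len(edges)
--     while lo < hi:
--         mid = (lo + hi) // 2
--         if connected(mid):
--             hi = mid
--         else:
--             lo = mid + 1
--     _, p1, p2 = edges[lo - 1]
--     return points[p1][0] * points[p2][0]
-- ===== Notes on version B (the rewrite author's own statement) =====
-- stated objective: faster
-- what changed: Replaces A's single incremental pass that merges aliased set objects edge by edge (with a per-edge id()-keyed dict rebuild to detect one component) by a binary search over the sorted edge list for the smallest connecting prefix, each probe testing connectivity from scratch with an iterative stack DFS over adjacency lists; the answer edge is then indexed directly.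
import Mathlib
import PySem

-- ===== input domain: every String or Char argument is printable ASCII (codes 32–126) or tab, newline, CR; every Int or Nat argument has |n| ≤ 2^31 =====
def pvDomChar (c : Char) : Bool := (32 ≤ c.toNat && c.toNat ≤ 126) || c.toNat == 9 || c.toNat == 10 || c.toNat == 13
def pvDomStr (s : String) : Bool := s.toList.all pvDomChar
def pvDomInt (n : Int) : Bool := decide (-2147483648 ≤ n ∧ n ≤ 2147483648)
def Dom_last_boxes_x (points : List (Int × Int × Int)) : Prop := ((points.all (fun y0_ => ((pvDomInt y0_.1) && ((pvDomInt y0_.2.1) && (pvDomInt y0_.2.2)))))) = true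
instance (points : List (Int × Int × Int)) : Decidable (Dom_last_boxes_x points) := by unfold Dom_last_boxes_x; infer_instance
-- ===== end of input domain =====

-- B replaces A's incremental merge of aliased set objects by a different algorithm: binary search
-- over the sorted edge list for the smallest connecting prefix, testing each prefix by stack DFS
-- (objective: faster, measured).


-- ===== PORT A =====
-- Python sorts the 3-lists [d, p1, p2] lexicographically; ported as triples compared by this lex key.
def pvLexKey (e : Int × Int × Int) : Lex (Int × Lex (Int × Int)) := toLex (e.1, toLex (e.2.1, e.2.2))

-- sum((a - b)**2 for a, b in zip(points[p1], points[p2]))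
def pvDistA (p q : Int × Int × Int) : Int :=
  ([(p.1, q.1), (p.2.1, q.2.1), (p.2.2, q.2.2)].map (fun ab => (ab.1 - ab.2) ^ 2)).sum

-- Heap model of Python's object identity: `sets` is the heap (cell c holds the set object whose
-- id is c; ids 0..n-1, never reallocated), `circ` maps each index i to id(circuits[i]).
-- The `for p in circuits[p2]` loop iterates a set; every iteration writes the same value, so the
-- final state does not depend on the (unmodelled) set iteration order; the dict {id(c): len(c)}
-- is keyed by object identity, which the Nat addresses model exactly.
def pvLoopA (points : List (Int × Int × Int)) :
    List (Int × Int × Int) → List Nat → List (PySem.Set Int) → Option Int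
  | [], _, _ => none
  | (_, p1, p2) :: rest, circ, sets =>
      let a := PySem.List.pyGetD circ p1 0
      let b := PySem.List.pyGetD circ p2 0
      -- circuits[p1].update(circuits[p2])
      let sets' := sets.set a (PySem.Set.update (sets.getD a []) (sets.getD b []))
      -- for p in circuits[p2]: circuits[p] = circuits[p1]
      let circ' := (sets.getD b []).foldl
        (fun cc p => PySem.List.pySetD cc p (PySem.List.pyGetD cc p1 0)) circ
      -- if len({id(c): len(c) for c in circuits}.values()) == 1
      if (circ'.foldl (fun d c => d.insert c (PySem.Set.len (sets'.getD c []))) PySem.Dict.empty).values.length == 1 then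
        some ((PySem.List.pyGetD points p1 (0, 0, 0)).1 * (PySem.List.pyGetD points p2 (0, 0, 0)).1)
      else
        pvLoopA points rest circ' sets'

def last_boxes_x (points : List (Int × Int × Int)) : Option Int :=
  let n : Int := points.length
  let pairs := PySem.List.combinations (PySem.List.pyRange 0 n 1) 2
  let distances := PySem.List.sorted
    (pairs.map (fun pr => match pr with
      | [p1, p2] => (pvDistA (PySem.List.pyGetD points p1 (0, 0, 0)) (PySem.List.pyGetD points p2 (0, 0, 0)), p1, p2)
      | _ => ((0 : Int), (0 : Int), (0 : Int))))
    pvLexKey false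
  pvLoopA points distances (List.range points.length)
    ((PySem.List.pyRange 0 n 1).map (fun i => PySem.Set.ofList [i]))

-- ===== PORT B =====
-- three small facts cited by pvDfs's decreasing_by (termination of the DFS stack loop)
theorem pvMark (seen : List Bool) (u : Int) (h : PySem.List.pyGet? seen u = some false) :
    ∃ j, ∃ _ : j < seen.length, seen[j] = false ∧ PySem.List.pySetD seen u true = seen.set j true := by
  unfold PySem.List.pyGet? at h
  cases hidx : PySem.List.pyIdx? seen.length u with
  | none => rw [hidx] at h; simp at h
  | some j =>
    rw [hidx] at h
    simp only [Option.bind_some] at h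
    have hj := List.getElem?_eq_some_iff.mp h
    obtain ⟨hlt, hv⟩ := hj
    refine ⟨j, hlt, hv, ?_⟩
    unfold PySem.List.pySetD PySem.List.pySet?
    rw [hidx]
    rfl

theorem pvMarkCount (seen : List Bool) (u : Int) (h : PySem.List.pyGet? seen u = some false) :
    (PySem.List.pySetD seen u true).countP (fun b => !b) + 1 = seen.countP (fun b => !b) := by
  obtain ⟨j, hlt, hv, hset⟩ := pvMark seen u h
  rw [hset, List.countP_set hlt, hv]
  have : seen.countP (fun b => !b) ≠ 0 := by
    intro h0
    have := List.countP_eq_zero.mp h0 _ (List.getElem_mem hlt)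
    rw [hv] at this
    simp at this
  simp
  omega

theorem pvAdjLen (adj : List (List Int)) (u : Int) :
    (PySem.List.pyGetD adj u []).length ≤ adj.flatten.length := by
  unfold PySem.List.pyGetD
  cases hg : PySem.List.pyGet? adj u with
  | none => simp
  | some l =>
    have hl : l ∈ adj := PySem.List.mem_of_pyGet?_eq_some adj hg
    simp only [Option.getD_some]
    calc l.length ≤ (adj.map List.length).sum := List.le_sum_of_mem (List.mem_map_of_mem hl)
    _ = adj.flatten.length := List.length_flatten.symm

-- the while-stack loop of Source B's connected(); stack head = Python's stack top (Source B pops the end)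
def pvDfs (adj : List (List Int)) (seen : List Bool) (stack : List Int) : List Bool :=
  match stack with
  | [] => seen
  | u :: rest =>
    match h : PySem.List.pyGet? seen u with
    | some false =>
        pvDfs adj (PySem.List.pySetD seen u true) ((PySem.List.pyGetD adj u []).reverse ++ rest)
    | some true => pvDfs adj seen rest
    | none => pvDfs adj seen rest
termination_by seen.countP (fun b => !b) * (adj.flatten.length + 1) + stack.length
decreasing_by
  · have h1 := pvMarkCount seen u h
    have h2 := pvAdjLen adj u
    simp only [List.length_append, List.length_reverse, List.length_cons]
    have he : seen.countP (fun b => !b) * (adj.flatten.length + 1)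
        = (PySem.List.pySetD seen u true).countP (fun b => !b) * (adj.flatten.length + 1)
          + (adj.flatten.length + 1) := by
      rw [← h1]; ring
    rw [he]
    omega
  · exact Nat.add_lt_add_left (Nat.lt_succ_self _) _
  · exact Nat.add_lt_add_left (Nat.lt_succ_self _) _

-- adj[p].append(q); adj[q].append(p)
def pvAddEdge (ad : List (List Int)) (e : Int × Int × Int) : List (List Int) :=
  let ad1 := PySem.List.pySetD ad e.2.1 (PySem.List.pyGetD ad e.2.1 [] ++ [e.2.2])
  PySem.List.pySetD ad1 e.2.2 (PySem.List.pyGetD ad1 e.2.2 [] ++ [e.2.1])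

-- is the graph of the k closest pairs connected?  (Source B's connected(k))
def pvConnected (n : Int) (edges : List (Int × Int × Int)) (k : Int) : Bool :=
  let adj := (PySem.List.slice edges none (some k)).foldl pvAddEdge
    ((PySem.List.pyRange 0 n 1).map (fun _ => ([] : List Int)))
  let seen := pvDfs adj (List.replicate n.toNat false) [0]
  seen.all (fun b => b)

-- the while lo < hi loop of Source B (binary search for the smallest connecting prefix)
def pvSearch (n : Int) (edges : List (Int × Int × Int)) (lo hi : Int) : Int :=
  if h : lo < hi then
    let mid := PySem.Int.floordiv (lo + hi) 2
    if pvConnected n edges mid then pvSearch n edges lo mid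
    else pvSearch n edges (mid + 1) hi
  else lo
termination_by (hi - lo).toNat
decreasing_by
  · have hb := PySem.Int.floordiv_two_mid_bounds (le_of_lt h)
    have hlt : PySem.Int.floordiv (lo + hi) 2 < hi :=
      (PySem.Int.floordiv_lt_iff_lt_mul (by omega)).2 (by omega)
    omega
  · have hb := PySem.Int.floordiv_two_mid_bounds (le_of_lt h)
    have hlt : PySem.Int.floordiv (lo + hi) 2 < hi :=
      (PySem.Int.floordiv_lt_iff_lt_mul (by omega)).2 (by omega)
    omega

def last_boxes_x_alt (points : List (Int × Int × Int)) : Option Int :=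
  let n : Int := points.length
  let raw := (PySem.List.pyRange 0 n 1).flatMap (fun p1 =>
      let q := PySem.List.pyGetD points p1 (0, 0, 0)
      (PySem.List.pyRange (p1 + 1) n 1).map (fun p2 =>
        let r := PySem.List.pyGetD points p2 (0, 0, 0)
        ((q.1 - r.1) ^ 2 + (q.2.1 - r.2.1) ^ 2 + (q.2.2 - r.2.2) ^ 2, p1, p2)))
  if raw.isEmpty then none
  else
    let edges := PySem.List.sorted raw pvLexKey false
    let lo := pvSearch n edges 1 (edges.length : Int)
    let e := PySem.List.pyGetD edges (lo - 1) (0, 0, 0)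
    some ((PySem.List.pyGetD points e.2.1 (0, 0, 0)).1 * (PySem.List.pyGetD points e.2.2 (0, 0, 0)).1)

-- ===== PRECONDITION & SPEC =====
def Spec_last_boxes_x (points : List (Int × Int × Int)) (out : Option Int) : Prop := out = last_boxes_x_alt points
instance (points : List (Int × Int × Int)) (out : Option Int) : Decidable (Spec_last_boxes_x points out) := by unfold Spec_last_boxes_x; infer_instance

-- ===== CLAIM (what is proved, stated in full; the proofs are below) =====
def Claim_equal_last_boxes_x : Prop := ∀ (points : List (Int × Int × Int)), Dom_last_boxes_x points → Spec_last_boxes_x points (last_boxes_x points)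

-- ===== LEMMAS AND PROOFS =====


-- ---------- bridge stage 1: A's heap-of-sets loop equals a label/count loop (pvLoopB) ----------

-- proof-side intermediate: Kruskal-style loop over a flat label array with a component counter
def pvLoopB (points : List (Int × Int × Int)) :
    List (Int × Int × Int) → List Int → Int → Option Int
  | [], _, _ => none
  | (_, p1, p2) :: rest, label, comps =>
      let a := PySem.List.pyGetD label p1 0
      let b := PySem.List.pyGetD label p2 0
      let st := if a ≠ b then (label.map (fun c => if c = b then a else c), comps - 1) else (label, comps)
      if st.2 == 1 then
        some ((PySem.List.pyGetD points p1 (0, 0, 0)).1 * (PySem.List.pyGetD points p2 (0, 0, 0)).1)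
      else
        pvLoopB points rest st.1 st.2

theorem pv_getD_set {α : Type} (dft : α) (l : List α) (k : Nat) (v : α) (j : Nat) (hk : k < l.length) :
    (l.set k v).getD j dft = if j = k then v else l.getD j dft := by
  rcases Nat.lt_or_ge j l.length with h | h
  · rw [List.getD_eq_getElem _ _ (by simpa using h), List.getD_eq_getElem _ _ h, List.getElem_set]
    simp [eq_comm]
  · rw [List.getD_eq_default _ _ (by simpa using h), List.getD_eq_default _ _ h]
    have : j ≠ k := by omega
    simp [this]

theorem pv_mem_update (s t : List Int) (p : Int) : p ∈ PySem.Set.update s t ↔ p ∈ s ∨ p ∈ t := by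
  have := PySem.Set.mem_foldl_add (l := t) (f := fun x : Int => x) (s := s) (y := p)
  simp only [exists_eq_right'] at this
  exact this

-- effect of the pointer-reassignment loop of A, characterised cell by cell
theorem pv_fold_writes (p1 : Int) (a : Nat) (hp1 : 0 ≤ p1) :
    ∀ (m : List Int) (circ : List Nat),
      (∀ p ∈ m, 0 ≤ p ∧ p.toNat < circ.length) →
      p1.toNat < circ.length →
      circ.getD p1.toNat 0 = a →
      ((m.foldl (fun cc p => PySem.List.pySetD cc p (PySem.List.pyGetD cc p1 0)) circ).length = circ.length ∧
       ∀ j : Nat, (m.foldl (fun cc p => PySem.List.pySetD cc p (PySem.List.pyGetD cc p1 0)) circ).getD j 0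
          = if (j : Int) ∈ m then a else circ.getD j 0) := by
  intro m
  induction m with
  | nil => intro circ _ _ _; simp
  | cons p m ih =>
    intro circ hb hlt hget
    obtain ⟨hp0, hplt⟩ := hb p (by simp)
    have hread : PySem.List.pyGetD circ p1 0 = a := by
      rw [PySem.List.pyGetD_of_nonneg circ 0 hp1, hget]
    have hpcast : p = ((p.toNat : Nat) : Int) := (Int.toNat_of_nonneg hp0).symm
    have hset : PySem.List.pySetD circ p (PySem.List.pyGetD circ p1 0) = circ.set p.toNat a := by
      rw [hread, hpcast]
      unfold PySem.List.pySetD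
      rw [PySem.List.pySet?_natCast _ _ _ hplt]
      rfl
    have hlen : (circ.set p.toNat a).length = circ.length := by simp
    have hb' : ∀ q ∈ m, 0 ≤ q ∧ q.toNat < (circ.set p.toNat a).length := by
      intro q hq; rw [hlen]; exact hb q (by simp [hq])
    have hget' : (circ.set p.toNat a).getD p1.toNat 0 = a := by
      rw [pv_getD_set _ _ _ _ _ hplt]; split
      · rfl
      · exact hget
    obtain ⟨ihlen, ihget⟩ := ih (circ.set p.toNat a) hb' (by omega) hget'
    simp only [List.foldl_cons, hset]
    refine ⟨by rw [ihlen, hlen], ?_⟩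
    intro j
    rw [ihget j]
    by_cases hjm : (j : Int) ∈ m
    · simp [hjm]
    · rw [pv_getD_set _ _ _ _ _ hplt]
      by_cases hjp : (j : Int) = p
      · have hj' : j = p.toNat := by omega
        rw [if_pos (by simp [hjp] : (j : Int) ∈ p :: m), if_neg hjm, if_pos hj']
      · have hj' : j ≠ p.toNat := by omega
        rw [if_neg hjm, if_neg hj', if_neg (by simp [hjp, hjm])]

theorem pv_ofList_len (l : List Nat) : (PySem.Set.ofList l).length = l.toFinset.card := by
  have h1 : (PySem.Set.ofList l).toFinset = l.toFinset := by
    ext x; simp [PySem.Set.mem_ofList]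
  have h2 := List.toFinset_card_of_nodup (PySem.Set.nodup_ofList l)
  rw [← h2, h1]

-- the length of the id-keyed dict A builds per edge = number of distinct ids
theorem pv_dict_len {ν : Type} (circ : List Nat) (f : Nat → ν) :
    ((circ.foldl (fun d c => d.insert c (f c)) PySem.Dict.empty).values).length
      = (PySem.Set.ofList circ).length := by
  have hk := PySem.Dict.keys_foldl_insert circ (fun _ c => f c) PySem.Dict.empty
  have hvk : ∀ (d : PySem.Dict Nat ν), d.values.length = d.keys.length := by
    intro d; simp only [PySem.Dict.values, PySem.Dict.keys, List.length_map]
  rw [hvk, hk]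
  simp [PySem.Dict.keys_empty, PySem.Set.update_nil_left]

theorem pv_card_replace {α : Type} [DecidableEq α] (circ : List α) (a b : α)
    (ha : a ∈ circ) (hb : b ∈ circ) (hne : a ≠ b) :
    (circ.map (fun c => if c = b then a else c)).toFinset.card = circ.toFinset.card - 1 := by
  have himg : (circ.map (fun c => if c = b then a else c)).toFinset
      = insert a (circ.toFinset.erase b) := by
    ext x
    simp only [List.mem_toFinset, List.mem_map, Finset.mem_insert, Finset.mem_erase]
    constructor
    · rintro ⟨c, hc, hx⟩
      by_cases h : c = b
      · left; simp [h] at hx; exact hx.symm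
      · right; simp [h] at hx; subst hx; exact ⟨by simpa [h], hc⟩
    · rintro (rfl | ⟨hxb, hx⟩)
      · exact ⟨b, hb, by simp⟩
      · exact ⟨x, hx, by simp [hxb]⟩
  rw [himg]
  have hae : a ∈ circ.toFinset.erase b := by
    simp [Finset.mem_erase, hne, ha]
  rw [Finset.insert_eq_self.mpr hae]
  exact Finset.card_erase_of_mem (by simp [hb])

-- the simulation invariant between A's heap state and the label array
def pvInv (circ : List Nat) (sets : List (PySem.Set Int)) (label : List Int) (comps : Int) : Prop :=
  label = circ.map (Nat.cast : Nat → Int) ∧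
  (∀ i (h : i < circ.length), circ[i] < sets.length) ∧
  (∀ c, c ∈ circ → ∀ p : Int,
    (p ∈ sets.getD c [] ↔ ∃ i, ∃ h : i < circ.length, circ[i] = c ∧ p = (i : Int))) ∧
  comps = ((PySem.Set.ofList circ).length : Int)

-- the member-set invariant survives one merge step of A
theorem pv_sets_inv (circ : List Nat) (sets : List (PySem.Set Int)) (aN bN : Nat)
    (haNmem : aN ∈ circ) (hbNmem : bN ∈ circ) (haNlt : aN < sets.length)
    (hI3 : ∀ c, c ∈ circ → ∀ p : Int,
      (p ∈ sets.getD c [] ↔ ∃ i, ∃ h : i < circ.length, circ[i] = c ∧ p = (i : Int))) :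
    ∀ c, c ∈ circ.map (fun c => if c = bN then aN else c) → ∀ p : Int,
      (p ∈ (sets.set aN (PySem.Set.update (sets.getD aN []) (sets.getD bN []))).getD c [] ↔
        ∃ i, ∃ h : i < (circ.map (fun c => if c = bN then aN else c)).length,
          (circ.map (fun c => if c = bN then aN else c))[i] = c ∧ p = (i : Int)) := by
  intro c hc p
  have hmaplen : (circ.map (fun c => if c = bN then aN else c)).length = circ.length := by simp
  by_cases hca : c = aN
  · subst hca
    rw [pv_getD_set _ _ _ _ _ haNlt, if_pos rfl, pv_mem_update]
    rw [hI3 c haNmem p, hI3 bN hbNmem p]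
    constructor
    · rintro (⟨i, h, hci, rfl⟩ | ⟨i, h, hci, rfl⟩) <;>
        exact ⟨i, by omega, by simp [List.getElem_map, hci], rfl⟩
    · rintro ⟨i, h, hci, rfl⟩
      have h' : i < circ.length := by omega
      rw [List.getElem_map] at hci
      by_cases hib : circ[i] = bN
      · right; exact ⟨i, h', hib, rfl⟩
      · left; rw [if_neg hib] at hci; exact ⟨i, h', hci, rfl⟩
  · -- c untouched: c ≠ aN, hence also c ≠ bN and c ∈ circ
    have hcb : c ≠ bN := by
      intro hcbeq
      obtain ⟨x, hx, hrx⟩ := List.mem_map.mp hc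
      by_cases hxb : x = bN
      · rw [if_pos hxb] at hrx; exact hca hrx.symm
      · rw [if_neg hxb] at hrx; exact hxb (hrx.trans hcbeq)
    have hcmem : c ∈ circ := by
      obtain ⟨x, hx, hrx⟩ := List.mem_map.mp hc
      by_cases hxb : x = bN
      · rw [if_pos hxb] at hrx; exact absurd hrx.symm hca
      · rw [if_neg hxb] at hrx; rwa [← hrx]
    rw [pv_getD_set _ _ _ _ _ haNlt, if_neg hca, hI3 c hcmem p]
    constructor
    · rintro ⟨i, h, hci, rfl⟩
      exact ⟨i, by omega, by rw [List.getElem_map, hci, if_neg hcb], rfl⟩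
    · rintro ⟨i, h, hci, rfl⟩
      have h' : i < circ.length := by omega
      rw [List.getElem_map] at hci
      by_cases hib : circ[i] = bN
      · rw [if_pos hib] at hci; exact absurd hci.symm hca
      · rw [if_neg hib] at hci; exact ⟨i, h', hci, rfl⟩

theorem pv_loop_eq (points : List (Int × Int × Int)) :
    ∀ (edges : List (Int × Int × Int)) (circ : List Nat) (sets : List (PySem.Set Int))
      (label : List Int) (comps : Int),
      (∀ e ∈ edges, 0 ≤ e.2.1 ∧ e.2.1.toNat < circ.length ∧ 0 ≤ e.2.2 ∧ e.2.2.toNat < circ.length) →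
      pvInv circ sets label comps →
      pvLoopA points edges circ sets = pvLoopB points edges label comps := by
  intro edges
  induction edges with
  | nil => intro circ sets label comps _ _; rfl
  | cons e rest ih =>
    obtain ⟨d, p1, p2⟩ := e
    intro circ sets label comps hb hinv
    obtain ⟨hI1, hI2, hI3, hI4⟩ := hinv
    obtain ⟨hp1n, hp1l, hp2n, hp2l⟩ := hb _ List.mem_cons_self
    simp only at hp1n hp1l hp2n hp2l
    simp only [pvLoopA, pvLoopB]
    have haN' : PySem.List.pyGetD circ p1 0 = circ.getD p1.toNat 0 :=
      PySem.List.pyGetD_of_nonneg circ 0 hp1n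
    have hbN' : PySem.List.pyGetD circ p2 0 = circ.getD p2.toNat 0 :=
      PySem.List.pyGetD_of_nonneg circ 0 hp2n
    set aN := PySem.List.pyGetD circ p1 0 with haNdef
    set bN := PySem.List.pyGetD circ p2 0 with hbNdef
    have haNg : aN = circ[p1.toNat]'hp1l := by rw [haN', List.getD_eq_getElem _ _ hp1l]
    have hbNg : bN = circ[p2.toNat]'hp2l := by rw [hbN', List.getD_eq_getElem _ _ hp2l]
    have haNmem : aN ∈ circ := by rw [haNg]; exact List.getElem_mem _
    have hbNmem : bN ∈ circ := by rw [hbNg]; exact List.getElem_mem _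
    have haNlt : aN < sets.length := by rw [haNg]; exact hI2 _ hp1l
    have hbNlt : bN < sets.length := by rw [hbNg]; exact hI2 _ hp2l
    have hlab1 : PySem.List.pyGetD label p1 0 = (aN : Int) := by
      rw [hI1, PySem.List.pyGetD_of_nonneg _ _ hp1n,
        List.getD_eq_getElem _ _ (by simpa using hp1l), haNg]
      exact List.getElem_map _
    have hlab2 : PySem.List.pyGetD label p2 0 = (bN : Int) := by
      rw [hI1, PySem.List.pyGetD_of_nonneg _ _ hp2n,
        List.getD_eq_getElem _ _ (by simpa using hp2l), hbNg]
      exact List.getElem_map _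
    have hmb : ∀ p ∈ sets.getD bN [], 0 ≤ p ∧ p.toNat < circ.length := by
      intro p hp
      obtain ⟨i, h, _, rfl⟩ := (hI3 bN hbNmem p).mp hp
      exact ⟨Int.natCast_nonneg i, by simpa using h⟩
    obtain ⟨hflen, hfget⟩ := pv_fold_writes p1 aN hp1n (sets.getD bN []) circ hmb hp1l haN'.symm
    have hcirc' : (sets.getD bN []).foldl
        (fun cc p => PySem.List.pySetD cc p (PySem.List.pyGetD cc p1 0)) circ
        = circ.map (fun c => if c = bN then aN else c) := by
      apply List.ext_getElem (by rw [hflen]; simp)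
      intro j h1 h2
      have h3 : j < circ.length := by rw [hflen] at h1; exact h1
      rw [← List.getD_eq_getElem _ 0 h1, hfget j, List.getElem_map]
      by_cases hjm : (j : Int) ∈ sets.getD bN []
      · obtain ⟨i, h, hci, hji⟩ := (hI3 bN hbNmem _).mp hjm
        have hij : i = j := by exact_mod_cast hji.symm
        rw [if_pos hjm, if_pos (by subst hij; exact hci)]
      · have hcj : ¬ circ[j] = bN := by
          intro hcj
          exact hjm ((hI3 bN hbNmem _).mpr ⟨j, h3, hcj, rfl⟩)
        rw [if_neg hjm, if_neg hcj, List.getD_eq_getElem _ _ h3]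
    rw [hcirc', hlab1, hlab2,
      pv_dict_len _ (fun c => ((sets.set aN ((sets.getD aN []).update (sets.getD bN []))).getD c []).len)]
    have hsetslen : (sets.set aN (PySem.Set.update (sets.getD aN []) (sets.getD bN []))).length
        = sets.length := by simp
    by_cases hab : aN = bN
    · -- no-op merge: the component structure is unchanged
      have hmapid : circ.map (fun c => if c = bN then aN else c) = circ := by
        rw [List.map_congr_left (g := fun c => c) ?_, List.map_id']
        intro x _
        by_cases hx : x = bN
        · rw [if_pos hx, hab, hx]
        · rw [if_neg hx]
      rw [hmapid, if_neg (show ¬((aN : Int) ≠ (bN : Int)) from by simp [hab])]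
      have hcond : (((PySem.Set.ofList circ).length == 1) : Bool) = ((comps == 1) : Bool) := by
        rw [hI4]
        rcases eq_or_ne (PySem.Set.ofList circ).length 1 with h | h
        · simp [h]
        · have : ¬ ((PySem.Set.ofList circ).length : Int) = 1 := by omega
          simp [h, this]
      rw [hcond]
      by_cases hc : comps = 1
      · rw [if_pos (by simp [hc]), if_pos (by simp [hc])]
      · rw [if_neg (by simp [hc]), if_neg (by simp [hc])]
        apply ih
        · intro e he; exact hb e (List.mem_cons_of_mem _ he)
        · refine ⟨hI1, ?_, ?_, hI4⟩
          · intro i h; rw [hsetslen]; exact hI2 i h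
          · have := pv_sets_inv circ sets aN bN haNmem hbNmem haNlt hI3
            rw [hmapid] at this
            exact this
    · -- real merge: one component disappears on both sides
      have hcastne : ((aN : Int) ≠ (bN : Int)) := by exact_mod_cast hab
      rw [if_pos hcastne]
      dsimp only
      have hge2 : 2 ≤ circ.toFinset.card := by
        have : 1 < circ.toFinset.card :=
          Finset.one_lt_card.mpr
            ⟨aN, by simpa using haNmem, bN, by simpa using hbNmem, hab⟩
        omega
      have hcardm := pv_card_replace circ aN bN haNmem hbNmem hab
      have hcond : (((PySem.Set.ofList (circ.map (fun c => if c = bN then aN else c))).length == 1) : Bool)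
          = ((comps - 1 == 1) : Bool) := by
        rw [pv_ofList_len, hcardm]
        have hc4 : comps = (circ.toFinset.card : Int) := by rw [hI4, pv_ofList_len]
        rcases eq_or_ne (circ.toFinset.card - 1) 1 with h | h
        · rw [h]; have : comps - 1 = 1 := by omega
          simp [this]
        · have : ¬ (comps - 1 = 1) := by omega
          simp [h, this]
      rw [hcond]
      have hlabel' : label.map (fun c => if c = (bN : Int) then (aN : Int) else c)
          = (circ.map (fun c => if c = bN then aN else c)).map (Nat.cast : Nat → Int) := by
        rw [hI1, List.map_map, List.map_map]
        apply List.map_congr_left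
        intro x _
        by_cases hx : x = bN
        · simp [hx]
        · have : ¬ ((x : Int) = (bN : Int)) := by exact_mod_cast hx
          simp [hx, this]
      by_cases hc : comps - 1 = 1
      · rw [if_pos (by simp [hc]), if_pos (by simp [hc])]
      · rw [if_neg (by simp [hc]), if_neg (by simp [hc])]
        rw [hlabel']
        apply ih
        · intro e he
          obtain ⟨h1, h2, h3, h4⟩ := hb e (List.mem_cons_of_mem _ he)
          exact ⟨h1, by simpa using h2, h3, by simpa using h4⟩
        · refine ⟨rfl, ?_, ?_, ?_⟩
          · intro i h
            rw [hsetslen]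
            have h' : i < circ.length := by simpa using h
            rw [List.getElem_map]
            by_cases hx : circ[i] = bN
            · rw [if_pos hx]; exact haNlt
            · rw [if_neg hx]; exact hI2 i h'
          · exact pv_sets_inv circ sets aN bN haNmem hbNmem haNlt hI3
          · rw [pv_ofList_len, hcardm, hI4, pv_ofList_len]
            omega

theorem pv_dist_eq (q r : Int × Int × Int) :
    pvDistA q r = (q.1 - r.1) ^ 2 + (q.2.1 - r.2.1) ^ 2 + (q.2.2 - r.2.2) ^ 2 := by
  simp [pvDistA]; ring

-- A's distance list built from combinations = B's distance list built from nested ranges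
theorem pv_comb2 (points : List (Int × Int × Int)) (n : Int) :
    ∀ (k : Nat) (a : Int), (n - a).toNat ≤ k →
      (PySem.List.combinations (PySem.List.pyRange a n 1) 2).map
        (fun pr => match pr with
          | [p1, p2] => (pvDistA (PySem.List.pyGetD points p1 (0, 0, 0)) (PySem.List.pyGetD points p2 (0, 0, 0)), p1, p2)
          | _ => ((0 : Int), (0 : Int), (0 : Int)))
      = (PySem.List.pyRange a n 1).flatMap (fun p1 =>
          let q := PySem.List.pyGetD points p1 (0, 0, 0)
          (PySem.List.pyRange (p1 + 1) n 1).map (fun p2 =>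
            let r := PySem.List.pyGetD points p2 (0, 0, 0)
            ((q.1 - r.1) ^ 2 + (q.2.1 - r.2.1) ^ 2 + (q.2.2 - r.2.2) ^ 2, p1, p2))) := by
  intro k
  induction k with
  | zero =>
    intro a h
    rw [PySem.List.pyRange_one_eq_nil (by omega)]
    rfl
  | succ k ihk =>
    intro a h
    by_cases hna : n ≤ a
    · rw [PySem.List.pyRange_one_eq_nil hna]; rfl
    · rw [PySem.List.pyRange_one_cons (by omega)]
      rw [show (2 : Nat) = 1 + 1 from rfl, PySem.List.combinations_cons_succ,
        PySem.List.combinations_one]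
      rw [List.map_append, List.map_map, List.map_map, List.flatMap_cons]
      congr 1
      · apply List.map_congr_left
        intro y _
        show (pvDistA _ _, a, y) = _
        rw [pv_dist_eq]
      · rw [show (1 : Nat) + 1 = 2 from rfl]
        exact ihk (a + 1) (by omega)


-- ---------- bridge stage 2: the label/count loop against prefix-connectivity ----------

-- one relabelling step (the label component of pvLoopB's body)
def pvStep (l : List Int) (e : Int × Int × Int) : List Int :=
  if PySem.List.pyGetD l e.2.1 0 ≠ PySem.List.pyGetD l e.2.2 0
  then l.map (fun c => if c = PySem.List.pyGetD l e.2.2 0 then PySem.List.pyGetD l e.2.1 0 else c)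
  else l

def pvInit (n : Nat) : List Int := List.map (fun k : Nat => (k : Int)) (List.range n)

-- labels after processing an edge list starting from the identity labelling
def pvLabels (n : Nat) (E : List (Int × Int × Int)) : List Int :=
  E.foldl pvStep (pvInit n)

-- edge endpoints are indices with e.2.1 < e.2.2 (as in A's combinations)
def pvGoodE (n : Nat) (E : List (Int × Int × Int)) : Prop :=
  ∀ e ∈ E, 0 ≤ e.2.1 ∧ e.2.1 < e.2.2 ∧ e.2.2 < (n : Int)

-- "the k closest pairs connect all n points", measured on the label fold
abbrev pvP (n : Nat) (edges : List (Int × Int × Int)) (k : Nat) : Prop :=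
  (pvLabels n (edges.take k)).toFinset.card = 1

theorem pv_step_len (l : List Int) (e : Int × Int × Int) : (pvStep l e).length = l.length := by
  unfold pvStep
  split <;> simp

theorem pv_foldl_step_len (E : List (Int × Int × Int)) (l : List Int) :
    (E.foldl pvStep l).length = l.length := by
  induction E generalizing l with
  | nil => rfl
  | cons e E ih => rw [List.foldl_cons, ih, pv_step_len]

theorem pv_labels_len (n : Nat) (E : List (Int × Int × Int)) : (pvLabels n E).length = n := by
  rw [pvLabels, pv_foldl_step_len]; simp [pvInit]

theorem pv_getD_mem (l : List Int) (i : Int) (h0 : 0 ≤ i) (h1 : i < l.length) :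
    PySem.List.pyGetD l i 0 ∈ l := by
  rw [PySem.List.pyGetD_eq_getElem l 0 h0 h1]
  exact List.getElem_mem _

theorem pv_all_eq_of_card_one (l : List Int) (h : l.toFinset.card = 1) :
    ∀ x ∈ l, ∀ y ∈ l, x = y := by
  intro x hx y hy
  have := Finset.card_le_one.mp (le_of_eq h)
  exact this x (List.mem_toFinset.mpr hx) y (List.mem_toFinset.mpr hy)

theorem pv_step_id_of_card (l : List Int) (e : Int × Int × Int)
    (hc : l.toFinset.card = 1)
    (h1 : 0 ≤ e.2.1) (h2 : e.2.1 < l.length) (h3 : 0 ≤ e.2.2) (h4 : e.2.2 < l.length) :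
    pvStep l e = l := by
  unfold pvStep
  have := pv_all_eq_of_card_one l hc _ (pv_getD_mem l e.2.1 h1 h2) _ (pv_getD_mem l e.2.2 h3 h4)
  simp [this]

theorem pv_P_mono (n : Nat) (edges : List (Int × Int × Int)) (hg : pvGoodE n edges) (k : Nat)
    (h : pvP n edges k) : pvP n edges (k + 1) := by
  unfold pvP at h ⊢
  by_cases hk : k < edges.length
  · rw [List.take_succ, List.getElem?_eq_getElem hk]
    simp only [Option.toList_some]
    rw [pvLabels, List.foldl_append, List.foldl_cons, List.foldl_nil]
    rw [pvLabels] at h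
    have hgood := hg (edges[k]) (List.getElem_mem hk)
    have hlen : ((edges.take k).foldl pvStep (pvInit n)).length = n := by
      rw [pv_foldl_step_len]; simp [pvInit]
    rw [pv_step_id_of_card _ _ h hgood.1 (by rw [hlen]; exact_mod_cast lt_trans hgood.2.1 hgood.2.2)
      (le_of_lt (lt_of_le_of_lt hgood.1 hgood.2.1)) (by rw [hlen]; exact_mod_cast hgood.2.2)]
    exact h
  · rw [List.take_of_length_le (show edges.length ≤ k by omega)] at h
    rw [List.take_of_length_le (show edges.length ≤ k+1 by omega)]
    exact h

theorem pv_P_mono' (n : Nat) (edges : List (Int × Int × Int)) (hg : pvGoodE n edges)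
    {j k : Nat} (hjk : j ≤ k) (h : pvP n edges j) : pvP n edges k := by
  induction k with
  | zero => have : j = 0 := by omega
            rwa [this] at h
  | succ k ih =>
    rcases Nat.lt_or_ge j (k+1) with hlt | hge
    · exact pv_P_mono n edges hg k (ih (by omega))
    · have : j = k + 1 := by omega
      rwa [this] at h

-- entry read of a mapped label list
theorem pv_getD_map_collapse (l : List Int) (f : Int → Int) (i : Int)
    (h0 : 0 ≤ i) (h1 : i < l.length) :
    PySem.List.pyGetD (l.map f) i 0 = f (PySem.List.pyGetD l i 0) := by
  rw [PySem.List.pyGetD_eq_getElem l 0 h0 h1,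
      PySem.List.pyGetD_eq_getElem (l.map f) 0 h0 (by simpa using h1)]
  simp

-- equal labels persist under further relabelling steps
theorem pv_pres_eq (n : Nat) (E : List (Int × Int × Int)) :
    ∀ (l : List Int), l.length = n →
      ∀ i j : Int, 0 ≤ i → i < (n:Int) → 0 ≤ j → j < (n:Int) →
      PySem.List.pyGetD l i 0 = PySem.List.pyGetD l j 0 →
      PySem.List.pyGetD (E.foldl pvStep l) i 0 = PySem.List.pyGetD (E.foldl pvStep l) j 0 := by
  induction E with
  | nil => intro l _ i j _ _ _ _ h; exact h
  | cons e E ih =>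
    intro l hl i j hi0 hi1 hj0 hj1 h
    rw [List.foldl_cons]
    apply ih (pvStep l e) (by rw [pv_step_len]; exact hl) i j hi0 hi1 hj0 hj1
    unfold pvStep
    split
    · rw [pv_getD_map_collapse _ _ i hi0 (by rw [hl]; exact hi1),
          pv_getD_map_collapse _ _ j hj0 (by rw [hl]; exact hj1), h]
    · exact h

-- after processing an edge list, the endpoints of each of its edges carry equal labels
theorem pv_pres_edge (n : Nat) (E : List (Int × Int × Int)) (hg : pvGoodE n E) :
    ∀ (l : List Int), l.length = n →
      ∀ e ∈ E, PySem.List.pyGetD (E.foldl pvStep l) e.2.1 0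
             = PySem.List.pyGetD (E.foldl pvStep l) e.2.2 0 := by
  induction E with
  | nil => intro l _ e he; cases he
  | cons e0 E ih =>
    intro l hl e he
    have hg0 := hg e0 List.mem_cons_self
    have hp0 : 0 ≤ e0.2.1 := hg0.1
    have hp1 : e0.2.1 < (n:Int) := lt_trans hg0.2.1 hg0.2.2
    have hq0 : 0 ≤ e0.2.2 := le_of_lt (lt_of_le_of_lt hp0 hg0.2.1)
    have hq1 : e0.2.2 < (n:Int) := hg0.2.2
    rw [List.foldl_cons]
    rcases List.mem_cons.mp he with rfl | he
    · apply pv_pres_eq n E (pvStep l e) (by rw [pv_step_len]; exact hl)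
        e.2.1 e.2.2 hp0 hp1 hq0 hq1
      unfold pvStep
      by_cases hab : PySem.List.pyGetD l e.2.1 0 = PySem.List.pyGetD l e.2.2 0
      · simp [hab]
      · rw [if_pos (by exact hab)]
        rw [pv_getD_map_collapse _ _ e.2.1 hp0 (by rw [hl]; exact hp1),
            pv_getD_map_collapse _ _ e.2.2 hq0 (by rw [hl]; exact hq1)]
        simp [hab]
    · exact ih (fun x hx => hg x (List.mem_cons_of_mem _ hx)) (pvStep l e0)
        (by rw [pv_step_len]; exact hl) e he

-- the label fold refines any predicate that is constant across the processed edges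
theorem pv_respects (n : Nat) (M : Int → Prop) (E : List (Int × Int × Int)) :
    pvGoodE n E → (∀ e ∈ E, (M e.2.1 ↔ M e.2.2)) →
    ∀ (l : List Int), l.length = n →
      (∀ i j : Int, 0 ≤ i → i < (n:Int) → 0 ≤ j → j < (n:Int) →
        PySem.List.pyGetD l i 0 = PySem.List.pyGetD l j 0 → (M i ↔ M j)) →
      ∀ i j : Int, 0 ≤ i → i < (n:Int) → 0 ≤ j → j < (n:Int) →
        PySem.List.pyGetD (E.foldl pvStep l) i 0 = PySem.List.pyGetD (E.foldl pvStep l) j 0 →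
        (M i ↔ M j) := by
  intro hg hM
  induction E with
  | nil => intro l _ H i j hi0 hi1 hj0 hj1 h; exact H i j hi0 hi1 hj0 hj1 h
  | cons e E ih =>
    intro l hl H
    have hg0 := hg e List.mem_cons_self
    have hp0 : 0 ≤ e.2.1 := hg0.1
    have hp1 : e.2.1 < (n:Int) := lt_trans hg0.2.1 hg0.2.2
    have hq0 : 0 ≤ e.2.2 := le_of_lt (lt_of_le_of_lt hp0 hg0.2.1)
    have hq1 : e.2.2 < (n:Int) := hg0.2.2
    have hMe := hM e List.mem_cons_self
    rw [List.foldl_cons]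
    apply ih (fun x hx => hg x (List.mem_cons_of_mem _ hx))
      (fun x hx => hM x (List.mem_cons_of_mem _ hx))
      (pvStep l e) (by rw [pv_step_len]; exact hl)
    -- the new initial labelling still refines M
    intro i j hi0 hi1 hj0 hj1 h
    unfold pvStep at h
    by_cases hab : PySem.List.pyGetD l e.2.1 0 = PySem.List.pyGetD l e.2.2 0
    · rw [if_neg (by simpa using hab)] at h
      exact H i j hi0 hi1 hj0 hj1 h
    · rw [if_pos (by exact hab)] at h
      rw [pv_getD_map_collapse _ _ i hi0 (by rw [hl]; exact hi1),
          pv_getD_map_collapse _ _ j hj0 (by rw [hl]; exact hj1)] at h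
      set a := PySem.List.pyGetD l e.2.1 0
      set b := PySem.List.pyGetD l e.2.2 0
      by_cases hib : PySem.List.pyGetD l i 0 = b <;> by_cases hjb : PySem.List.pyGetD l j 0 = b
      · exact H i j hi0 hi1 hj0 hj1 (hib.trans hjb.symm)
      · -- collapse i = a, collapse j = label j ⇒ label j = a = label e.2.1
        rw [if_pos hib, if_neg hjb] at h
        have h1 : M i ↔ M e.2.2 := H i e.2.2 hi0 hi1 hq0 hq1 hib
        have h2 : M j ↔ M e.2.1 := H j e.2.1 hj0 hj1 hp0 hp1 h.symm
        rw [h1, h2, hMe]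
      · rw [if_neg hib, if_pos hjb] at h
        have h1 : M j ↔ M e.2.2 := H j e.2.2 hj0 hj1 hq0 hq1 hjb
        have h2 : M i ↔ M e.2.1 := H i e.2.1 hi0 hi1 hp0 hp1 h
        rw [h1, h2, hMe]
      · rw [if_neg hib, if_neg hjb] at h
        exact H i j hi0 hi1 hj0 hj1 h

-- the identity labelling reads back the index
theorem pv_init_getD (n : Nat) (i : Int) (h0 : 0 ≤ i) (h1 : i < (n:Int)) :
    PySem.List.pyGetD (pvInit n) i 0 = i := by
  rw [pvInit, PySem.List.pyGetD_eq_getElem _ 0 h0 (by simpa [pvInit] using h1),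
    List.getElem_map, List.getElem_range]
  omega

theorem pv_init_card (n : Nat) : (pvInit n).toFinset.card = n := by
  have hnd : (pvInit n).Nodup :=
    List.nodup_range.map (fun a b h => by exact_mod_cast h)
  rw [pvInit, List.toFinset_card_of_nodup (by rw [pvInit] at hnd; exact hnd),
    List.length_map, List.length_range]

-- the component count tracks the number of distinct labels across one step
theorem pv_step_card (l : List Int) (e : Int × Int × Int)
    (h1 : 0 ≤ e.2.1) (h2 : e.2.1 < l.length) (h3 : 0 ≤ e.2.2) (h4 : e.2.2 < l.length) :
    ((pvStep l e).toFinset.card : Int)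
      = if PySem.List.pyGetD l e.2.1 0 ≠ PySem.List.pyGetD l e.2.2 0
        then (l.toFinset.card : Int) - 1 else (l.toFinset.card : Int) := by
  unfold pvStep
  by_cases hab : PySem.List.pyGetD l e.2.1 0 = PySem.List.pyGetD l e.2.2 0
  · simp [hab]
  · rw [if_pos (by exact hab), if_pos (by exact hab)]
    have ha := pv_getD_mem l e.2.1 h1 h2
    have hb := pv_getD_mem l e.2.2 h3 h4
    rw [pv_card_replace l _ _ ha hb hab]
    have : 1 ≤ l.toFinset.card := Finset.card_pos.mpr ⟨_, List.mem_toFinset.mpr ha⟩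
    omega

-- the returned product for prefix length K
def pvAns (points edges : List (Int × Int × Int)) (K : Nat) : Option Int :=
  some ((PySem.List.pyGetD points (edges.getD (K-1) (0,0,0)).2.1 (0, 0, 0)).1 *
        (PySem.List.pyGetD points (edges.getD (K-1) (0,0,0)).2.2 (0, 0, 0)).1)

-- the label/count loop returns the product at the first connecting prefix
theorem pv_mid_loop (points edges : List (Int × Int × Int))
    (hg : pvGoodE points.length edges)
    (hex : ∃ k, pvP points.length edges k) :
    ∀ m, (∀ j, j ≤ m → ¬ pvP points.length edges j) →
      pvLoopB points (edges.drop m) (pvLabels points.length (edges.take m))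
        (((pvLabels points.length (edges.take m)).toFinset.card : Int))
      = pvAns points edges (Nat.find hex) := by
  have hnm : ∀ m, edges.length ≤ m → ¬ (∀ j, j ≤ m → ¬ pvP points.length edges j) := by
    intro m hm hnp
    obtain ⟨k, hk⟩ := hex
    by_cases hkm : k ≤ m
    · exact hnp k hkm hk
    · apply hnp m le_rfl
      unfold pvP at hk ⊢
      rwa [List.take_of_length_le hm, ← List.take_of_length_le (show edges.length ≤ k by omega)]
  suffices haux : ∀ d m, edges.length - m ≤ d → (∀ j, j ≤ m → ¬ pvP points.length edges j) →
      pvLoopB points (edges.drop m) (pvLabels points.length (edges.take m))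
        (((pvLabels points.length (edges.take m)).toFinset.card : Int))
      = pvAns points edges (Nat.find hex) by
    intro m hnp
    exact haux edges.length m (by omega) hnp
  intro d
  induction d with
  | zero =>
    intro m hdm hnp
    exact absurd hnp (hnm m (by omega))
  | succ d ih =>
    intro m hdm hnp
    by_cases hm : m < edges.length
    · have hDrop : edges.drop m = edges[m] :: edges.drop (m + 1) := List.drop_eq_getElem_cons hm
      rcases hEm : edges[m] with ⟨d0, p1, p2⟩
      obtain ⟨he1, he2, he3⟩ := hg (edges[m]) (List.getElem_mem hm)
      rw [hEm] at he1 he2 he3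
      simp only at he1 he2 he3
      set L := pvLabels points.length (edges.take m) with hL
      have hlenL : L.length = points.length := pv_labels_len _ _
      have hp1a : (0:Int) ≤ p1 := he1
      have hp1b : p1 < (L.length : Int) := by rw [hlenL]; exact lt_trans he2 he3
      have hp2a : (0:Int) ≤ p2 := le_of_lt (lt_of_le_of_lt he1 he2)
      have hp2b : p2 < (L.length : Int) := by rw [hlenL]; exact he3
      have hLsucc : pvLabels points.length (edges.take (m + 1)) = pvStep L (d0, p1, p2) := by
        rw [pvLabels, List.take_succ, List.getElem?_eq_getElem hm, hEm]
        simp only [Option.toList_some]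
        rw [List.foldl_append, List.foldl_cons, List.foldl_nil]
        rfl
      have hCsucc := pv_step_card L (d0, p1, p2) hp1a hp1b hp2a hp2b
      simp only at hCsucc
      have hnpm : ¬ pvP points.length edges m := hnp m le_rfl
      have hcardm : L.toFinset.card ≠ 1 := hnpm
      rw [hDrop, hEm]
      simp only [pvLoopB]
      by_cases hab : PySem.List.pyGetD L p1 0 = PySem.List.pyGetD L p2 0
      · -- no merge: the step is the identity
        have hstepid : pvStep L (d0, p1, p2) = L := by
          unfold pvStep; simp [hab]
        rw [if_neg (show ¬(PySem.List.pyGetD L p1 0 ≠ PySem.List.pyGetD L p2 0) by simpa using hab)]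
        dsimp only
        have hcond : (((L.toFinset.card : Int) == 1) : Bool) = false := by
          simp; omega
        rw [hcond]
        simp only [Bool.false_eq_true, if_false]
        have hnp' : ∀ j, j ≤ m + 1 → ¬ pvP points.length edges j := by
          intro j hj
          by_cases hjm : j ≤ m
          · exact hnp j hjm
          · have : j = m + 1 := by omega
            subst this
            unfold pvP
            rw [hLsucc, hstepid]
            exact hcardm
        have := ih (m + 1) (by omega) hnp'
        rw [hLsucc, hstepid] at this
        exact this
      · rw [if_pos (show (PySem.List.pyGetD L p1 0 ≠ PySem.List.pyGetD L p2 0) by simpa using hab)]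
        dsimp only
        rw [if_pos (show (PySem.List.pyGetD L p1 0 ≠ PySem.List.pyGetD L p2 0) by simpa using hab)] at hCsucc
        by_cases hP1 : pvP points.length edges (m + 1)
        · -- the merge connects everything: the loop returns here
          have hfind : Nat.find hex = m + 1 := by
            rw [Nat.find_eq_iff]
            exact ⟨hP1, fun j hj => hnp j (by omega)⟩
          have hc1 : ((pvStep L (d0, p1, p2)).toFinset.card : Int) = 1 := by
            have : (pvStep L (d0, p1, p2)).toFinset.card = 1 := by
              rw [← hLsucc]; exact hP1
            omega
          have hcond : ((((L.toFinset.card : Int) - 1) == 1) : Bool) = true := by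
            simp; omega
          rw [hcond]
          simp only [if_true]
          rw [pvAns, hfind]
          simp only [Nat.add_sub_cancel]
          rw [List.getD_eq_getElem _ _ hm, hEm]
        · -- not yet connected: recurse
          have hc1 : ((pvStep L (d0, p1, p2)).toFinset.card : Int) ≠ 1 := by
            intro hcc
            apply hP1
            unfold pvP
            rw [hLsucc]
            omega
          have hcond : ((((L.toFinset.card : Int) - 1) == 1) : Bool) = false := by
            simp; omega
          rw [hcond]
          simp only [Bool.false_eq_true, if_false]
          have hnp' : ∀ j, j ≤ m + 1 → ¬ pvP points.length edges j := by
            intro j hj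
            by_cases hjm : j ≤ m
            · exact hnp j hjm
            · have : j = m + 1 := by omega
              subst this
              unfold pvP
              rw [hLsucc]
              intro hcc
              exact hc1 (by omega)
          have hthis := ih (m + 1) (by omega) hnp'
          rw [hLsucc] at hthis
          rw [hCsucc] at hthis
          unfold pvStep at hthis
          rw [if_pos (show (PySem.List.pyGetD L p1 0 ≠ PySem.List.pyGetD L p2 0) by simpa using hab)] at hthis
          exact hthis
        -- end
    · exact absurd hnp (hnm m (by omega))


-- ---------- bridge stage 3: the DFS prefix test against the label fold ----------

-- "E' has an edge between j and v (in either orientation)"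
def pvAdjP (E : List (Int × Int × Int)) (j : Nat) (v : Int) : Prop :=
  ∃ d, ((d, (j:Int), v) ∈ E ∨ (d, v, (j:Int)) ∈ E)

theorem pv_addEdge_len (ad : List (List Int)) (e : Int × Int × Int) :
    (pvAddEdge ad e).length = ad.length := by
  unfold pvAddEdge
  rw [PySem.List.length_pySetD, PySem.List.length_pySetD]

theorem pv_foldl_addEdge_len (E : List (Int × Int × Int)) (ad : List (List Int)) :
    (E.foldl pvAddEdge ad).length = ad.length := by
  induction E generalizing ad with
  | nil => rfl
  | cons e E ih => rw [List.foldl_cons, ih, pv_addEdge_len]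

theorem pv_addEdge_getD (ad : List (List Int)) (e : Int × Int × Int) (j : Nat)
    (hp0 : 0 ≤ e.2.1) (hpq : e.2.1 < e.2.2) (hq : e.2.2 < (ad.length : Int)) :
    (pvAddEdge ad e).getD j [] =
      if j = e.2.2.toNat then ad.getD e.2.2.toNat [] ++ [e.2.1]
      else if j = e.2.1.toNat then ad.getD e.2.1.toNat [] ++ [e.2.2]
      else ad.getD j [] := by
  have hq0 : 0 ≤ e.2.2 := le_of_lt (lt_of_le_of_lt hp0 hpq)
  have hpN : e.2.1.toNat < ad.length := by omega
  have hqN : e.2.2.toNat < ad.length := by omega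
  have hne : e.2.1.toNat ≠ e.2.2.toNat := by omega
  unfold pvAddEdge
  rw [PySem.List.pySetD_of_nonneg _ _ hp0, PySem.List.pySetD_of_nonneg _ _ hq0,
      PySem.List.pyGetD_of_nonneg _ _ hp0, PySem.List.pyGetD_of_nonneg _ _ hq0]
  rw [pv_getD_set _ _ _ _ e.2.2.toNat (by simpa using hpN)]
  rw [if_neg (Ne.symm hne)]
  rw [pv_getD_set _ _ _ _ j (by simpa using hqN)]
  by_cases hjq : j = e.2.2.toNat
  · rw [if_pos hjq, if_pos hjq]
  · rw [if_neg hjq, if_neg hjq]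
    rw [pv_getD_set _ _ _ _ j hpN]

theorem pv_adj_fold_mem (n : Nat) :
    ∀ (E : List (Int × Int × Int)) (ad : List (List Int)) (B : Nat → Int → Prop),
      pvGoodE n E → ad.length = n →
      (∀ j, j < n → ∀ v, (v ∈ ad.getD j [] ↔ B j v)) →
      ∀ j, j < n → ∀ v, (v ∈ (E.foldl pvAddEdge ad).getD j [] ↔ (B j v ∨ pvAdjP E j v)) := by
  intro E
  induction E with
  | nil =>
    intro ad B _ _ hbase j hj v
    rw [List.foldl_nil, hbase j hj v]
    simp [pvAdjP]
  | cons e E ih =>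
    intro ad B hg hlen hbase j hj v
    have hg0 := hg e List.mem_cons_self
    have hp0 : 0 ≤ e.2.1 := hg0.1
    have hpq : e.2.1 < e.2.2 := hg0.2.1
    have hqn : e.2.2 < (n:Int) := hg0.2.2
    rw [List.foldl_cons]
    have hbase' : ∀ j, j < n → ∀ v, (v ∈ (pvAddEdge ad e).getD j [] ↔
        (B j v ∨ (((j:Int) = e.2.1 ∧ v = e.2.2) ∨ ((j:Int) = e.2.2 ∧ v = e.2.1)))) := by
      intro j hj v
      have hq0 : 0 ≤ e.2.2 := le_of_lt (lt_of_le_of_lt hp0 hpq)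
      rw [pv_addEdge_getD ad e j hp0 hpq (by omega)]
      by_cases hjq : j = e.2.2.toNat
      · rw [if_pos hjq, ← hjq]
        rw [List.mem_append, hbase j hj v, List.mem_singleton]
        constructor
        · rintro (hb | rfl)
          · left; exact hb
          · right; right; constructor <;> omega
        · rintro (hb | (⟨h1, h2⟩ | ⟨h1, h2⟩))
          · left; exact hb
          · omega
          · right; exact h2
      · rw [if_neg hjq]
        by_cases hjp : j = e.2.1.toNat
        · rw [if_pos hjp, ← hjp]
          rw [List.mem_append, hbase j hj v, List.mem_singleton]
          constructor
          · rintro (hb | rfl)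
            · left; exact hb
            · right; left; constructor <;> omega
          · rintro (hb | (⟨h1, h2⟩ | ⟨h1, h2⟩))
            · left; exact hb
            · right; exact h2
            · omega
        · rw [if_neg hjp, hbase j hj v]
          constructor
          · intro hb; left; exact hb
          · rintro (hb | (⟨h1, h2⟩ | ⟨h1, h2⟩))
            · exact hb
            · omega
            · omega
    have := ih (pvAddEdge ad e) _ (fun x hx => hg x (List.mem_cons_of_mem _ hx))
      (by rw [pv_addEdge_len]; exact hlen) hbase' j hj v
    rw [this]
    unfold pvAdjP
    constructor
    · rintro ((hb | hpair) | ⟨d, hd⟩)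
      · left; exact hb
      · right
        rcases hpair with ⟨h1, h2⟩ | ⟨h1, h2⟩
        · exact ⟨e.1, Or.inl (by rw [h1, h2]; exact List.mem_cons_self)⟩
        · exact ⟨e.1, Or.inr (by rw [h1, h2]; exact List.mem_cons_self)⟩
      · right
        refine ⟨d, ?_⟩
        rcases hd with hd | hd
        · exact Or.inl (List.mem_cons_of_mem _ hd)
        · exact Or.inr (List.mem_cons_of_mem _ hd)
    · rintro (hb | ⟨d, hd⟩)
      · left; left; exact hb
      · rcases hd with hd | hd
        · rcases List.mem_cons.mp hd with heq | hmem
          · left; right; left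
            rw [← heq]
            exact ⟨rfl, rfl⟩
          · right; exact ⟨d, Or.inl hmem⟩
        · rcases List.mem_cons.mp hd with heq | hmem
          · left; right; right
            rw [← heq]
            exact ⟨rfl, rfl⟩
          · right; exact ⟨d, Or.inr hmem⟩

-- the empty adjacency table reads back empty everywhere
theorem pv_adj0_getD (n : Int) (j : Nat) :
    (((PySem.List.pyRange 0 n 1).map (fun _ => ([] : List Int)))).getD j [] = [] := by
  rcases Nat.lt_or_ge j ((PySem.List.pyRange 0 n 1).map (fun _ => ([] : List Int))).length with h | h
  · rw [List.getD_eq_getElem _ _ h, List.getElem_map]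
  · rw [List.getD_eq_default _ _ h]

-- DFS unfolding equations
theorem pv_dfs_nil (adj : List (List Int)) (seen : List Bool) : pvDfs adj seen [] = seen := by
  rw [pvDfs]

theorem pv_dfs_mark (adj : List (List Int)) (seen : List Bool) (u : Int) (rest : List Int)
    (h : PySem.List.pyGet? seen u = some false) :
    pvDfs adj seen (u :: rest)
      = pvDfs adj (PySem.List.pySetD seen u true) ((PySem.List.pyGetD adj u []).reverse ++ rest) := by
  conv_lhs => rw [pvDfs]
  split
  · rfl
  · rename_i h'; rw [h] at h'; cases h'
  · rename_i h'; rw [h] at h'; cases h' 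

theorem pv_dfs_skipT (adj : List (List Int)) (seen : List Bool) (u : Int) (rest : List Int)
    (h : PySem.List.pyGet? seen u = some true) :
    pvDfs adj seen (u :: rest) = pvDfs adj seen rest := by
  conv_lhs => rw [pvDfs]
  split
  · rename_i h'; rw [h] at h'; cases h'
  · rfl
  · rfl

theorem pv_dfs_skipN (adj : List (List Int)) (seen : List Bool) (u : Int) (rest : List Int)
    (h : PySem.List.pyGet? seen u = none) :
    pvDfs adj seen (u :: rest) = pvDfs adj seen rest := by
  conv_lhs => rw [pvDfs]
  split
  · rename_i h'; rw [h] at h'; cases h'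
  · rfl
  · rfl

theorem pv_dfs_len (adj : List (List Int)) :
    ∀ (seen : List Bool) (stack : List Int), (pvDfs adj seen stack).length = seen.length := by
  intro seen stack
  induction seen, stack using pvDfs.induct adj with
  | case1 seen => rw [pv_dfs_nil]
  | case2 seen u rest h ih => rw [pv_dfs_mark adj seen u rest h, ih, PySem.List.length_pySetD]
  | case3 seen u rest h ih => rw [pv_dfs_skipT adj seen u rest h, ih]
  | case4 seen u rest h ih => rw [pv_dfs_skipN adj seen u rest h, ih]

theorem pv_dfs_mono (adj : List (List Int)) :
    ∀ (seen : List Bool) (stack : List Int) (j : Nat),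
      seen.getD j false = true → (pvDfs adj seen stack).getD j false = true := by
  intro seen stack
  induction seen, stack using pvDfs.induct adj with
  | case1 seen => intro j hj; rw [pv_dfs_nil]; exact hj
  | case2 seen u rest h ih =>
    intro j hj
    rw [pv_dfs_mark adj seen u rest h]
    apply ih
    obtain ⟨j0, hj0, _, hset⟩ := pvMark seen u h
    rw [hset, pv_getD_set _ _ _ _ _ hj0]
    split
    · rfl
    · exact hj
  | case3 seen u rest h ih => intro j hj; rw [pv_dfs_skipT adj seen u rest h]; exact ih j hj
  | case4 seen u rest h ih => intro j hj; rw [pv_dfs_skipN adj seen u rest h]; exact ih j hj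

theorem pv_dfs_stack (adj : List (List Int)) (N : Nat)
    (hadjR : ∀ u : Int, ∀ v ∈ PySem.List.pyGetD adj u [], 0 ≤ v ∧ v < (N:Int)) :
    ∀ (seen : List Bool) (stack : List Int), seen.length = N →
      (∀ u ∈ stack, 0 ≤ u ∧ u < (N:Int)) →
      ∀ u ∈ stack, (pvDfs adj seen stack).getD u.toNat false = true := by
  intro seen stack
  induction seen, stack using pvDfs.induct adj with
  | case1 seen => intro _ _ u hu; cases hu
  | case2 seen u rest h ih =>
    intro hlen hstack w hw
    rw [pv_dfs_mark adj seen u rest h]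
    obtain ⟨hu0, hu1⟩ := hstack u List.mem_cons_self
    have hlen' : (PySem.List.pySetD seen u true).length = N := by
      rw [PySem.List.length_pySetD]; exact hlen
    have hstack' : ∀ x ∈ (PySem.List.pyGetD adj u []).reverse ++ rest, 0 ≤ x ∧ x < (N:Int) := by
      intro x hx
      rcases List.mem_append.mp hx with hx | hx
      · exact hadjR u x (List.mem_reverse.mp hx)
      · exact hstack x (List.mem_cons_of_mem _ hx)
    rcases List.mem_cons.mp hw with rfl | hw
    · apply pv_dfs_mono
      rw [PySem.List.pySetD_of_nonneg _ _ hu0,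
          pv_getD_set _ _ _ _ _ (by omega), if_pos rfl]
    · exact ih hlen' hstack' w (List.mem_append.mpr (Or.inr hw))
  | case3 seen u rest h ih =>
    intro hlen hstack w hw
    rw [pv_dfs_skipT adj seen u rest h]
    rcases List.mem_cons.mp hw with rfl | hw
    · apply pv_dfs_mono
      obtain ⟨hu0, hu1⟩ := hstack w List.mem_cons_self
      rw [PySem.List.pyGet?_of_nonneg seen hu0] at h
      have := List.getElem?_eq_some_iff.mp h
      rw [List.getD_eq_getElem _ _ this.1]
      exact this.2
    · exact ih hlen (fun x hx => hstack x (List.mem_cons_of_mem _ hx)) w hw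
  | case4 seen u rest h ih =>
    intro hlen hstack w hw
    obtain ⟨hu0, hu1⟩ := hstack u List.mem_cons_self
    exfalso
    rw [PySem.List.pyGet?_eq_none_iff] at h
    exact h ⟨by omega, by omega⟩
  -- end pv_dfs_stack

theorem pv_dfs_closed (adj : List (List Int)) (N : Nat)
    (hadjR : ∀ u : Int, ∀ v ∈ PySem.List.pyGetD adj u [], 0 ≤ v ∧ v < (N:Int)) :
    ∀ (seen : List Bool) (stack : List Int), seen.length = N →
      (∀ u ∈ stack, 0 ≤ u ∧ u < (N:Int)) →
      (∀ j, j < N → seen.getD j false = true →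
        ∀ v ∈ PySem.List.pyGetD adj (j:Int) [], seen.getD v.toNat false = true ∨ v ∈ stack) →
      ∀ j, j < N → (pvDfs adj seen stack).getD j false = true →
        ∀ v ∈ PySem.List.pyGetD adj (j:Int) [], (pvDfs adj seen stack).getD v.toNat false = true := by
  intro seen stack
  induction seen, stack using pvDfs.induct adj with
  | case1 seen =>
    intro hlen _ hinv j hj hmark v hv
    rw [pv_dfs_nil] at hmark ⊢
    rcases hinv j hj hmark v hv with hcase | hcase
    · exact hcase
    · cases hcase
  | case2 seen u rest h ih =>
    intro hlen hstack hinv j hj hmark v hv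
    obtain ⟨hu0, hu1⟩ := hstack u List.mem_cons_self
    have hlen' : (PySem.List.pySetD seen u true).length = N := by
      rw [PySem.List.length_pySetD]; exact hlen
    have hstack' : ∀ x ∈ (PySem.List.pyGetD adj u []).reverse ++ rest, 0 ≤ x ∧ x < (N:Int) := by
      intro x hx
      rcases List.mem_append.mp hx with hx | hx
      · exact hadjR u x (List.mem_reverse.mp hx)
      · exact hstack x (List.mem_cons_of_mem _ hx)
    have hsetD : ∀ m : Nat, (PySem.List.pySetD seen u true).getD m false
        = if m = u.toNat then true else seen.getD m false := by
      intro m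
      rw [PySem.List.pySetD_of_nonneg _ _ hu0, pv_getD_set _ _ _ _ _ (by omega)]
    have hinv' : ∀ j, j < N → (PySem.List.pySetD seen u true).getD j false = true →
        ∀ v ∈ PySem.List.pyGetD adj (j:Int) [],
          (PySem.List.pySetD seen u true).getD v.toNat false = true
            ∨ v ∈ (PySem.List.pyGetD adj u []).reverse ++ rest := by
      intro j' hj' hmark' v' hv'
      rw [hsetD j'] at hmark'
      by_cases hju : j' = u.toNat
      · right
        apply List.mem_append.mpr
        left
        rw [List.mem_reverse]
        have : ((j' : Nat) : Int) = u := by omega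
        rwa [this] at hv'
      · rw [if_neg hju] at hmark'
        rcases hinv j' hj' hmark' v' hv' with hcase | hcase
        · left
          rw [hsetD]
          by_cases hvu : v'.toNat = u.toNat
          · rw [if_pos hvu]
          · rw [if_neg hvu]; exact hcase
        · rcases List.mem_cons.mp hcase with rfl | hcase
          · left; rw [hsetD, if_pos rfl]
          · right; exact List.mem_append.mpr (Or.inr hcase)
    rw [pv_dfs_mark adj seen u rest h] at hmark ⊢
    exact ih hlen' hstack' hinv' j hj hmark v hv
  | case3 seen u rest h ih =>
    intro hlen hstack hinv j hj hmark v hv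
    obtain ⟨hu0, hu1⟩ := hstack u List.mem_cons_self
    have huT : seen.getD u.toNat false = true := by
      rw [PySem.List.pyGet?_of_nonneg seen hu0] at h
      have := List.getElem?_eq_some_iff.mp h
      rw [List.getD_eq_getElem _ _ this.1]
      exact this.2
    have hinv' : ∀ j, j < N → seen.getD j false = true →
        ∀ v ∈ PySem.List.pyGetD adj (j:Int) [], seen.getD v.toNat false = true ∨ v ∈ rest := by
      intro j' hj' hmark' v' hv'
      rcases hinv j' hj' hmark' v' hv' with hcase | hcase
      · left; exact hcase
      · rcases List.mem_cons.mp hcase with rfl | hcase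
        · left; exact huT
        · right; exact hcase
    rw [pv_dfs_skipT adj seen u rest h] at hmark ⊢
    exact ih hlen (fun x hx => hstack x (List.mem_cons_of_mem _ hx)) hinv' j hj hmark v hv
  | case4 seen u rest h ih =>
    intro hlen hstack _ j hj hmark v hv
    obtain ⟨hu0, hu1⟩ := hstack u List.mem_cons_self
    exfalso
    rw [PySem.List.pyGet?_eq_none_iff] at h
    exact h ⟨by omega, by omega⟩

theorem pv_dfs_sound (adj : List (List Int)) (N : Nat) (Lab : Int → Prop)
    (hadjR : ∀ u : Int, ∀ v ∈ PySem.List.pyGetD adj u [], 0 ≤ v ∧ v < (N:Int))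
    (hadjL : ∀ u : Int, 0 ≤ u → u < (N:Int) → ∀ v ∈ PySem.List.pyGetD adj u [], Lab u → Lab v) :
    ∀ (seen : List Bool) (stack : List Int), seen.length = N →
      (∀ u ∈ stack, 0 ≤ u ∧ u < (N:Int) ∧ Lab u) →
      (∀ j, j < N → seen.getD j false = true → Lab (j:Int)) →
      ∀ j, j < N → (pvDfs adj seen stack).getD j false = true → Lab (j:Int) := by
  intro seen stack
  induction seen, stack using pvDfs.induct adj with
  | case1 seen =>
    intro hlen _ hseenL j hj hmark
    rw [pv_dfs_nil] at hmark
    exact hseenL j hj hmark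
  | case2 seen u rest h ih =>
    intro hlen hstack hseenL j hj hmark
    obtain ⟨hu0, hu1, huL⟩ := hstack u List.mem_cons_self
    have hlen' : (PySem.List.pySetD seen u true).length = N := by
      rw [PySem.List.length_pySetD]; exact hlen
    have hstack' : ∀ x ∈ (PySem.List.pyGetD adj u []).reverse ++ rest,
        0 ≤ x ∧ x < (N:Int) ∧ Lab x := by
      intro x hx
      rcases List.mem_append.mp hx with hx | hx
      · have hx' := List.mem_reverse.mp hx
        obtain ⟨h0, h1⟩ := hadjR u x hx'
        exact ⟨h0, h1, hadjL u hu0 hu1 x hx' huL⟩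
      · exact hstack x (List.mem_cons_of_mem _ hx)
    have hseenL' : ∀ j, j < N → (PySem.List.pySetD seen u true).getD j false = true → Lab (j:Int) := by
      intro j' hj' hmark'
      rw [PySem.List.pySetD_of_nonneg _ _ hu0, pv_getD_set _ _ _ _ _ (by omega)] at hmark'
      by_cases hju : j' = u.toNat
      · have : ((j' : Nat) : Int) = u := by omega
        rw [this]
        exact huL
      · rw [if_neg hju] at hmark'
        exact hseenL j' hj' hmark'
    rw [pv_dfs_mark adj seen u rest h] at hmark
    exact ih hlen' hstack' hseenL' j hj hmark
  | case3 seen u rest h ih =>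
    intro hlen hstack hseenL j hj hmark
    rw [pv_dfs_skipT adj seen u rest h] at hmark
    exact ih hlen (fun x hx => hstack x (List.mem_cons_of_mem _ hx)) hseenL j hj hmark
  | case4 seen u rest h ih =>
    intro hlen hstack hseenL j hj hmark
    rw [pv_dfs_skipN adj seen u rest h] at hmark
    exact ih hlen (fun x hx => hstack x (List.mem_cons_of_mem _ hx)) hseenL j hj hmark

theorem pv_all_iff (l : List Bool) :
    (l.all (fun b => b) = true) ↔ ∀ j, j < l.length → l.getD j false = true := by
  rw [List.all_eq_true]
  constructor
  · intro h j hj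
    rw [List.getD_eq_getElem _ _ hj]
    exact h _ (List.getElem_mem hj)
  · intro h x hx
    obtain ⟨j, hj, rfl⟩ := List.mem_iff_getElem.mp hx
    rw [← List.getD_eq_getElem _ false hj]
    exact h j hj

theorem pv_replicate_getD (n : Nat) (j : Nat) : (List.replicate n false).getD j false = false := by
  rcases Nat.lt_or_ge j n with h | h
  · rw [List.getD_eq_getElem _ _ (by simpa using h)]
    exact List.getElem_replicate _
  · rw [List.getD_eq_default _ _ (by simpa using h)]

theorem pv_card_one_of_all (L : List Int) (n : Nat) (hL : L.length = n) (hn : 1 ≤ n)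
    (h : ∀ j : Nat, j < n → PySem.List.pyGetD L (j:Int) 0 = PySem.List.pyGetD L 0 0) :
    L.toFinset.card = 1 := by
  rw [Finset.card_eq_one]
  refine ⟨PySem.List.pyGetD L 0 0, ?_⟩
  ext x
  simp only [List.mem_toFinset, Finset.mem_singleton]
  constructor
  · intro hx
    obtain ⟨j, hj, rfl⟩ := List.mem_iff_getElem.mp hx
    rw [← List.getD_eq_getElem _ 0 hj, ← PySem.List.pyGetD_natCast]
    exact h j (by omega)
  · rintro rfl
    exact pv_getD_mem L 0 le_rfl (by rw [hL]; omega)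

-- the DFS prefix test agrees with the label fold's component count
theorem pv_conn_iff (n : Nat) (edges : List (Int × Int × Int))
    (hg : pvGoodE n edges) (hn : 1 ≤ n) (k : Int) (hk : 0 ≤ k) :
    (pvConnected (n:Int) edges k = true ↔ pvP n edges k.toNat) := by
  have hconn : pvConnected (n:Int) edges k
      = (pvDfs ((edges.take k.toNat).foldl pvAddEdge
            ((PySem.List.pyRange 0 (n:Int) 1).map (fun _ => ([] : List Int))))
          (List.replicate n false) [0]).all (fun b => b) := by
    unfold pvConnected
    rw [PySem.List.slice_to edges hk, Int.toNat_natCast]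
  set adj0 := ((PySem.List.pyRange 0 (n:Int) 1).map (fun _ => ([] : List Int))) with hadj0
  set E' := edges.take k.toNat with hE'
  set A := E'.foldl pvAddEdge adj0 with hA
  set L := pvLabels n E' with hLdef
  set seen0 := List.replicate n false with hseen0def
  set M := pvDfs A seen0 [0] with hM
  have hgE' : pvGoodE n E' := fun e he => hg e (List.mem_of_mem_take he)
  have hadj0len : adj0.length = n := by
    rw [hadj0, List.length_map, PySem.List.length_pyRange_one]
    omega
  have hAlen : A.length = n := by rw [hA, pv_foldl_addEdge_len]; exact hadj0len
  have hAmem : ∀ j, j < n → ∀ v, (v ∈ A.getD j [] ↔ pvAdjP E' j v) := by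
    have hbase : ∀ j, j < n → ∀ v : Int, (v ∈ adj0.getD j [] ↔ False) := by
      intro j hj v
      rw [hadj0, pv_adj0_getD]
      simp
    intro j hj v
    rw [hA, pv_adj_fold_mem n E' adj0 (fun _ _ => False) hgE' hadj0len hbase j hj v]
    simp
  have hadjPb : ∀ (j : Nat) (v : Int), pvAdjP E' j v → 0 ≤ v ∧ v < (n:Int) := by
    intro j v hp
    obtain ⟨d, hd | hd⟩ := hp
    · have := hgE' _ hd
      constructor
      · exact le_of_lt (lt_of_le_of_lt this.1 this.2.1)
      · exact this.2.2
    · have := hgE' _ hd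
      exact ⟨this.1, lt_trans this.2.1 this.2.2⟩
  have hadjR : ∀ u : Int, ∀ v ∈ PySem.List.pyGetD A u [], 0 ≤ v ∧ v < (n:Int) := by
    intro u v hv
    unfold PySem.List.pyGetD at hv
    cases hgu : PySem.List.pyGet? A u with
    | none => rw [hgu] at hv; cases hv
    | some l =>
      rw [hgu] at hv
      simp only [Option.getD_some] at hv
      have hl : l ∈ A := PySem.List.mem_of_pyGet?_eq_some A hgu
      obtain ⟨m, hm, rfl⟩ := List.mem_iff_getElem.mp hl
      have hmn : m < n := by rw [← hAlen]; exact hm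
      have : A[m] = A.getD m [] := (List.getD_eq_getElem _ _ hm).symm
      rw [this] at hv
      exact hadjPb m v ((hAmem m hmn v).mp hv)
  have hLlen : L.length = n := pv_labels_len n E'
  have hseen0len : seen0.length = n := by rw [hseen0def, List.length_replicate]
  have hstack0 : ∀ u ∈ ([0] : List Int), 0 ≤ u ∧ u < (n:Int) := by
    intro u hu
    rw [List.mem_singleton] at hu
    subst hu
    constructor
    · exact le_rfl
    · omega
  have hseen0F : ∀ j : Nat, seen0.getD j false = false := fun j => pv_replicate_getD n j
  have hMlen : M.length = n := by rw [hM, pv_dfs_len, hseen0len]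
  have hpres : ∀ (j : Nat) (v : Int), pvAdjP E' j v →
      PySem.List.pyGetD L (j:Int) 0 = PySem.List.pyGetD L v 0 := by
    intro j v hp
    obtain ⟨d, hd | hd⟩ := hp
    · exact pv_pres_edge n E' hgE' (pvInit n) (by simp [pvInit]) _ hd
    · exact (pv_pres_edge n E' hgE' (pvInit n) (by simp [pvInit]) _ hd).symm
  constructor
  · -- all marked → one component
    intro hc
    unfold pvP
    apply pv_card_one_of_all _ n (pv_labels_len n _) (by omega)
    intro j hj
    have hmarked : ∀ m : Nat, m < n → M.getD m false = true := by
      rw [hconn] at hc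
      have := (pv_all_iff _).mp hc
      intro m hm
      apply this
      rw [hMlen]
      exact hm
    have hadjL : ∀ u : Int, 0 ≤ u → u < (n:Int) →
        ∀ v ∈ PySem.List.pyGetD A u [],
          (PySem.List.pyGetD L u 0 = PySem.List.pyGetD L 0 0) →
          (PySem.List.pyGetD L v 0 = PySem.List.pyGetD L 0 0) := by
      intro u hu0 hu1 v hv hLab
      have hcast : ((u.toNat : Nat) : Int) = u := by omega
      rw [← hcast, PySem.List.pyGetD_natCast] at hv
      have hp := (hAmem u.toNat (by omega) v).mp hv
      have := hpres u.toNat v hp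
      rw [hcast] at this
      rw [← this]
      exact hLab
    refine pv_dfs_sound A n (fun v => PySem.List.pyGetD L v 0 = PySem.List.pyGetD L 0 0)
      hadjR hadjL seen0 [0] hseen0len ?_ ?_ j hj (hmarked j hj)
    · intro u hu
      rw [List.mem_singleton] at hu
      subst hu
      exact ⟨le_rfl, by omega, rfl⟩
    · intro j' hj' hmark'
      rw [hseen0F j'] at hmark'
      cases hmark'
  · -- one component → all marked
    intro hP
    have hall : ∀ i : Int, 0 ≤ i → i < (n:Int) →
        PySem.List.pyGetD L i 0 = PySem.List.pyGetD L 0 0 := by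
      intro i h0 h1
      exact pv_all_eq_of_card_one L hP _ (pv_getD_mem L i h0 (by rw [hLlen]; exact h1))
        _ (pv_getD_mem L 0 le_rfl (by rw [hLlen]; omega))
    have hclosed := pv_dfs_closed A n hadjR seen0 [0] hseen0len hstack0
      (by intro j' hj' hmark' v hv; rw [hseen0F j'] at hmark'; cases hmark')
    have hM0 : M.getD 0 false = true := by
      have := pv_dfs_stack A n hadjR seen0 [0] hseen0len hstack0 0 (List.mem_singleton.mpr rfl)
      simpa using this
    rw [hconn, pv_all_iff]
    intro j hj
    rw [hMlen] at hj
    have hMedge : ∀ e ∈ E',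
        ((0 ≤ e.2.1 ∧ e.2.1 < (n:Int) ∧ M.getD e.2.1.toNat false = true) ↔
         (0 ≤ e.2.2 ∧ e.2.2 < (n:Int) ∧ M.getD e.2.2.toNat false = true)) := by
      intro e he
      have hge := hgE' e he
      have hp0 : 0 ≤ e.2.1 := hge.1
      have hp1 : e.2.1 < (n:Int) := lt_trans hge.2.1 hge.2.2
      have hq0 : 0 ≤ e.2.2 := le_of_lt (lt_of_le_of_lt hp0 hge.2.1)
      have hq1 : e.2.2 < (n:Int) := hge.2.2
      have hqadj : e.2.2 ∈ A.getD e.2.1.toNat [] := by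
        apply (hAmem e.2.1.toNat (by omega) e.2.2).mpr
        refine ⟨e.1, Or.inl ?_⟩
        rw [Int.toNat_of_nonneg hp0]
        exact he
      have hpadj : e.2.1 ∈ A.getD e.2.2.toNat [] := by
        apply (hAmem e.2.2.toNat (by omega) e.2.1).mpr
        refine ⟨e.1, Or.inr ?_⟩
        rw [Int.toNat_of_nonneg hq0]
        exact he
      constructor
      · rintro ⟨-, -, hmk⟩
        refine ⟨hq0, hq1, ?_⟩
        have := hclosed e.2.1.toNat (by omega) hmk e.2.2
          (by rw [PySem.List.pyGetD_natCast]; exact hqadj)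
        exact this
      · rintro ⟨-, -, hmk⟩
        refine ⟨hp0, hp1, ?_⟩
        have := hclosed e.2.2.toNat (by omega) hmk e.2.1
          (by rw [PySem.List.pyGetD_natCast]; exact hpadj)
        exact this
    have hresp := pv_respects n
      (fun v => 0 ≤ v ∧ v < (n:Int) ∧ M.getD v.toNat false = true) E' hgE' hMedge
      (pvInit n) (by simp [pvInit])
      (by
        intro i j' hi0 hi1 hj0 hj1 hij
        rw [pv_init_getD n i hi0 hi1, pv_init_getD n j' hj0 hj1] at hij
        rw [hij])
      (j:Int) 0 (by omega) (by exact_mod_cast hj) le_rfl (by omega)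
      (hall (j:Int) (by omega) (by exact_mod_cast hj))
    have hMj := hresp.mpr ⟨le_rfl, by omega, by simpa using hM0⟩
    simpa using hMj.2.2

-- the binary search returns the boundary of the monotone predicate
theorem pv_search_spec (n : Int) (edges : List (Int × Int × Int)) :
    ∀ (d : Nat) (lo hi : Int), (hi - lo).toNat ≤ d → 1 ≤ lo → lo ≤ hi →
      pvConnected n edges hi = true → pvConnected n edges (lo - 1) = false →
      (1 ≤ pvSearch n edges lo hi ∧ pvSearch n edges lo hi ≤ hi ∧
       pvConnected n edges (pvSearch n edges lo hi) = true ∧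
       pvConnected n edges (pvSearch n edges lo hi - 1) = false) := by
  intro d
  induction d with
  | zero =>
    intro lo hi hd h1 h2 hhi hlo
    have hlh : lo = hi := by omega
    rw [pvSearch, dif_neg (by omega)]
    exact ⟨h1, by omega, by rw [hlh]; exact hhi, hlo⟩
  | succ d ih =>
    intro lo hi hd h1 h2 hhi hlo
    by_cases hlh : lo < hi
    · rw [pvSearch, dif_pos hlh]
      have hb := PySem.Int.floordiv_two_mid_bounds (le_of_lt hlh)
      have hmidlt : PySem.Int.floordiv (lo + hi) 2 < hi :=
        (PySem.Int.floordiv_lt_iff_lt_mul (by omega)).2 (by omega)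
      set mid := PySem.Int.floordiv (lo + hi) 2 with hmid
      by_cases hc : pvConnected n edges mid = true
      · rw [if_pos hc]
        have := ih lo mid (by omega) h1 (by omega) hc hlo
        exact ⟨this.1, by omega, this.2.2.1, this.2.2.2⟩
      · rw [if_neg hc]
        have hcf : pvConnected n edges (mid + 1 - 1) = false := by
          rw [show mid + 1 - 1 = mid by ring]
          exact Bool.not_eq_true _ ▸ (by simpa using hc)
        have := ih (mid + 1) hi (by omega) (by omega) (by omega) hhi hcf
        exact ⟨by omega, this.2.1, this.2.2.1, this.2.2.2⟩
    · rw [pvSearch, dif_neg hlh]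
      have hlh' : lo = hi := by omega
      exact ⟨h1, by omega, by rw [hlh']; exact hhi, hlo⟩

-- the complete graph's full edge list connects everything
theorem pv_P_full (n : Nat) (edges : List (Int × Int × Int)) (hg : pvGoodE n edges) (hn : 2 ≤ n)
    (hcomp : ∀ i : Nat, 1 ≤ i → i < n → ∃ d, (d, (0:Int), (i:Int)) ∈ edges) :
    pvP n edges edges.length := by
  unfold pvP
  rw [List.take_length]
  apply pv_card_one_of_all _ n (pv_labels_len n edges) (by omega)
  intro j hj
  rcases Nat.eq_zero_or_pos j with rfl | hj1
  · rfl
  · obtain ⟨d, hd⟩ := hcomp j hj1 hj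
    have := pv_pres_edge n edges hg (pvInit n) (by simp [pvInit]) (d, (0:Int), (j:Int)) hd
    simpa using this.symm

-- ===== VERDICT (by name: the statement is the Claim_ definition above) =====
theorem last_boxes_x_spec : Claim_equal_last_boxes_x := by
  unfold Claim_equal_last_boxes_x
  intro points _
  unfold Spec_last_boxes_x
  simp only [last_boxes_x, last_boxes_x_alt]
  rw [pv_comb2 points (points.length : Int) points.length 0 (by simp)]
  set raw := (PySem.List.pyRange 0 (points.length : Int) 1).flatMap (fun p1 =>
      let q := PySem.List.pyGetD points p1 (0, 0, 0)
      (PySem.List.pyRange (p1 + 1) (points.length : Int) 1).map (fun p2 =>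
        let r := PySem.List.pyGetD points p2 (0, 0, 0)
        ((q.1 - r.1) ^ 2 + (q.2.1 - r.2.1) ^ 2 + (q.2.2 - r.2.2) ^ 2, p1, p2))) with hraw
  by_cases hemp : raw.isEmpty = true
  · -- fewer than two points: no pairs on either side
    rw [if_pos hemp]
    have hrawnil : raw = [] := List.isEmpty_iff.mp hemp
    rw [hrawnil]
    have : PySem.List.sorted ([] : List (Int × Int × Int)) pvLexKey false = [] :=
      (PySem.List.sorted_eq_nil_iff _ _ _).mpr rfl
    rw [this]
    rfl
  · rw [if_neg hemp]
    have hrawne : raw ≠ [] := fun h => hemp (List.isEmpty_iff.mpr h)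
    -- at least two points
    have hn2 : 2 ≤ points.length := by
      obtain ⟨e, he⟩ := List.exists_mem_of_ne_nil raw hrawne
      rw [hraw] at he
      obtain ⟨p1, hp1, he2⟩ := List.mem_flatMap.mp he
      obtain ⟨p2, hp2, rfl⟩ := List.mem_map.mp he2
      have h1 := PySem.List.mem_pyRange_one.mp hp1
      have h2 := PySem.List.mem_pyRange_one.mp hp2
      omega
    set E := PySem.List.sorted raw pvLexKey false with hE
    have hmemE : ∀ e, e ∈ E ↔ e ∈ raw := fun e => PySem.List.mem_sorted raw pvLexKey false e
    have hgood : pvGoodE points.length E := by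
      intro e he
      rw [hmemE, hraw] at he
      obtain ⟨p1, hp1, he2⟩ := List.mem_flatMap.mp he
      obtain ⟨p2, hp2, rfl⟩ := List.mem_map.mp he2
      have h1 := PySem.List.mem_pyRange_one.mp hp1
      have h2 := PySem.List.mem_pyRange_one.mp hp2
      refine ⟨?_, ?_, ?_⟩ <;> (dsimp only; omega)
    have hcomp : ∀ i : Nat, 1 ≤ i → i < points.length → ∃ d, (d, (0:Int), (i:Int)) ∈ E := by
      intro i hi1 hi2
      refine ⟨((PySem.List.pyGetD points 0 (0,0,0)).1 - (PySem.List.pyGetD points (i:Int) (0,0,0)).1) ^ 2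
        + ((PySem.List.pyGetD points 0 (0,0,0)).2.1 - (PySem.List.pyGetD points (i:Int) (0,0,0)).2.1) ^ 2
        + ((PySem.List.pyGetD points 0 (0,0,0)).2.2 - (PySem.List.pyGetD points (i:Int) (0,0,0)).2.2) ^ 2, ?_⟩
      rw [hmemE, hraw]
      apply List.mem_flatMap.mpr
      refine ⟨0, PySem.List.mem_pyRange_one.mpr ⟨le_rfl, by omega⟩, ?_⟩
      apply List.mem_map.mpr
      exact ⟨(i:Int), PySem.List.mem_pyRange_one.mpr ⟨by omega, by omega⟩, rfl⟩
    have hPfull : pvP points.length E E.length := pv_P_full points.length E hgood hn2 hcomp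
    have hex : ∃ k, pvP points.length E k := ⟨E.length, hPfull⟩
    have hElen1 : 1 ≤ E.length := by
      rcases Nat.eq_zero_or_pos E.length with h0 | h0
      · exact absurd ((PySem.List.sorted_eq_nil_iff _ _ _).mp (List.eq_nil_of_length_eq_zero h0)) hrawne
      · exact h0
    -- A's loop equals the label/count loop
    have hA : pvLoopA points E (List.range points.length)
        ((PySem.List.pyRange 0 (points.length : Int) 1).map (fun i => PySem.Set.ofList [i]))
        = pvLoopB points E (pvInit points.length) ((points.length : Nat) : Int) := by
      apply pv_loop_eq
      · intro e he
        obtain ⟨h1, h2, h3⟩ := hgood e he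
        refine ⟨h1, ?_, by omega, ?_⟩
        · simp only [List.length_range]; omega
        · simp only [List.length_range]; omega
      · refine ⟨rfl, ?_, ?_, ?_⟩
        · intro i h
          simp only [List.length_range] at h
          rw [List.getElem_range]
          simp [PySem.List.length_pyRange_one, h]
        · intro c hc p
          have hcN : c < points.length := by
            rw [List.mem_range] at hc; exact hc
          have hset : ((PySem.List.pyRange 0 (points.length : Int) 1).map
              (fun i => PySem.Set.ofList [i])).getD c [] = PySem.Set.ofList [(c : Int)] := by
            rw [PySem.List.pyRange_zero_nat, List.map_map,
              List.getD_eq_getElem _ _ (by simp [hcN]), List.getElem_map, List.getElem_range]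
            rfl
          have hsing : PySem.Set.ofList [(c : Int)] = [(c : Int)] :=
            PySem.Set.ofList_eq_self_of_nodup _ (by simp)
          rw [hset, hsing]
          constructor
          · intro hp
            have : p = (c : Int) := List.mem_singleton.mp hp
            exact ⟨c, by simpa using hcN, by rw [List.getElem_range], this⟩
          · rintro ⟨i, h, hci, rfl⟩
            have hi : i < points.length := by simpa using h
            rw [List.getElem_range] at hci
            rw [hci]
            exact List.mem_singleton.mpr rfl
        · rw [PySem.Set.ofList_eq_self_of_nodup _ (List.nodup_range)]
          simp
    -- the label/count loop returns the product at the first connecting prefix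
    have hmid := pv_mid_loop points E hgood hex 0
      (by
        intro j hj
        have : j = 0 := by omega
        subst this
        unfold pvP
        rw [List.take_zero]
        show ¬ (pvInit points.length).toFinset.card = 1
        rw [pv_init_card]
        omega)
    rw [List.drop_zero, List.take_zero] at hmid
    have hcast : ((pvLabels points.length ([] : List (Int × Int × Int))).toFinset.card : Int)
        = ((points.length : Nat) : Int) := by
      show ((pvInit points.length).toFinset.card : Int) = _
      rw [pv_init_card]
    rw [hcast] at hmid
    rw [hA]
    rw [show pvLabels points.length ([] : List (Int × Int × Int)) = pvInit points.length from rfl] at hmid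
    rw [hmid]
    -- B's binary search finds the same prefix
    have hconnlen : pvConnected (points.length : Int) E (E.length : Int) = true := by
      rw [pv_conn_iff points.length E hgood (by omega) (E.length : Int) (by omega)]
      rw [Int.toNat_natCast]
      exact hPfull
    have hconn0 : pvConnected (points.length : Int) E ((1:Int) - 1) = false := by
      rw [show ((1:Int) - 1) = 0 by ring]
      rw [Bool.eq_false_iff]
      intro hc
      have := (pv_conn_iff points.length E hgood (by omega) 0 le_rfl).mp hc
      unfold pvP at this
      rw [show (0:Int).toNat = 0 from rfl, List.take_zero] at this
      have h2 : (pvInit points.length).toFinset.card = 1 := this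
      rw [pv_init_card] at h2
      omega
    obtain ⟨hR1, hR2, hRc, hRc'⟩ := pv_search_spec (points.length : Int) E
      ((E.length : Int) - 1).toNat 1 (E.length : Int) (by omega) le_rfl (by omega) hconnlen hconn0
    set R := pvSearch (points.length : Int) E 1 (E.length : Int) with hR
    have hPR : pvP points.length E R.toNat :=
      (pv_conn_iff points.length E hgood (by omega) R (by omega)).mp hRc
    have hnPR1 : ¬ pvP points.length E (R - 1).toNat := by
      intro h
      have := (pv_conn_iff points.length E hgood (by omega) (R - 1) (by omega)).mpr h
      rw [hRc'] at this
      cases this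
    have hKR : Nat.find hex = R.toNat := by
      have hKle : Nat.find hex ≤ R.toNat := Nat.find_le hPR
      have hKgt : ¬ Nat.find hex ≤ (R - 1).toNat := by
        intro hle
        exact hnPR1 (pv_P_mono' points.length E hgood hle (Nat.find_spec hex))
      omega
    -- the returned products coincide
    unfold pvAns
    have hEidx : PySem.List.pyGetD E (R - 1) ((0:Int), (0:Int), (0:Int))
        = E.getD (Nat.find hex - 1) ((0:Int), (0:Int), (0:Int)) := by
      rw [PySem.List.pyGetD_of_nonneg E _ (by omega)]
      congr 1
      omega
    rw [hEidx]
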